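-- pv_equiv track=rewrite | github.com/ikostan/ProjectEuler | Problem_11/problem_11.py | process_diagonal_up_right
-- ===== SOURCE A (Python) =====
-- def process_diagonal_up_right(numbers: list):
--     result = 0
--     row = len(numbers) - 1
--
--     while row - 3 >= 0:
--         col = 0
--         while col + 3 <= len(numbers[row]) - 1:
--             temp_arr = [numbers[row][col], numbers[row - 1][col + 1],
--                         numbers[row - 2][col + 2], numbers[row - 3][col + 3]]
--             temp = multiply_members(temp_arr)
--             if temp > result:
--                 result = temp
--             col += 1
--         row -= 1
--     return result
--
-- def multiply_members(numbers: list):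
--     result = 1
--
--     if 0 in numbers:
--         return 0
--
--     for i in numbers:
--         result *= i
--
--     return result
-- ===== SOURCE B (Python) =====
-- def process_diagonal_up_right(numbers: list):
--     best = 0
--     rows = len(numbers)
--     cols = len(numbers[0]) if numbers else 0
--     for d in range(rows + cols - 1):
--         diag = []
--         r = min(rows - 1, d)
--         while r >= 0 and d - r < len(numbers[r]):
--             diag.append(numbers[r][d - r])
--             r -= 1
--         for i in range(len(diag) - 3):
--             p = diag[i] * diag[i + 1] * diag[i + 2] * diag[i + 3]
--             if p > best:
--                 best = p
--     return best
-- ===== Notes on version B (the rewrite author's own statement) =====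
-- stated objective: alternative
-- what changed: B regroups the grid into up-right diagonals (built by a single walk up each anti-diagonal) and slides a 1-D window of 4 along each diagonal list, instead of A's nested row/column index arithmetic over four explicitly indexed rows; B also drops the zero-membership shortcut of A's product helper.
-- outside the precondition, e.g. on process_diagonal_up_right([[1, 1, 1, 2], [1, 1, 1], [1, 1], [2]]): A returns 0, B returns 4; on process_diagonal_up_right([[1], [1], [1], [1, 2, 3, 4]]): A raises IndexError, B returns 0
import Mathlib
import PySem

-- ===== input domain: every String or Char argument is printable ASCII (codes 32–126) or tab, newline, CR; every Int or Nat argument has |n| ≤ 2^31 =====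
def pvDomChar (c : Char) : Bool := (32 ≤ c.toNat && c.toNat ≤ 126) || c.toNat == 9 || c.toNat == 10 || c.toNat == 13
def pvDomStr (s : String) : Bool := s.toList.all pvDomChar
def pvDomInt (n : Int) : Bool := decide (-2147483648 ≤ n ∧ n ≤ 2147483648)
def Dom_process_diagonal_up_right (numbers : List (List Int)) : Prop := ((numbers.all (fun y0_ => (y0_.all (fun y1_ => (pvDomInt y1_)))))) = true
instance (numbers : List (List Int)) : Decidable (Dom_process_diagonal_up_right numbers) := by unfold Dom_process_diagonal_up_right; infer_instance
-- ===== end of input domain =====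

-- B regroups the grid into up-right diagonals and slides a 1-D window of 4 along each
-- diagonal list (running max), instead of A's nested row/column index arithmetic; same cost.

-- ===== PORT A =====
def multiply_members (numbers : List Int) : Int :=
  if numbers.contains 0 then 0
  else numbers.foldl (fun result i => result * i) 1

def process_diagonal_up_right (numbers : List (List Int)) : Int :=
  (PySem.List.pyRange ((numbers.length : Int) - 1) 2 (-1)).foldl
    (fun result row =>
      (PySem.List.pyRange 0 (((PySem.List.pyGetD numbers row []).length : Int) - 3) 1).foldl
        (fun result col =>
          let temp := multiply_members
            [PySem.List.pyGetD (PySem.List.pyGetD numbers row []) col 0,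
             PySem.List.pyGetD (PySem.List.pyGetD numbers (row - 1) []) (col + 1) 0,
             PySem.List.pyGetD (PySem.List.pyGetD numbers (row - 2) []) (col + 2) 0,
             PySem.List.pyGetD (PySem.List.pyGetD numbers (row - 3) []) (col + 3) 0]
          if temp > result then temp else result)
        result)
    0

-- ===== PORT B =====
-- the 'while r >= 0 and d - r < len(numbers[r])' collection walk up one anti-diagonal
def buildDiag (numbers : List (List Int)) (d : Int) (r : Int) : List Int :=
  if h : 0 ≤ r ∧ d - r < ((PySem.List.pyGetD numbers r []).length : Int) then
    PySem.List.pyGetD (PySem.List.pyGetD numbers r []) (d - r) 0 :: buildDiag numbers d (r - 1)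
  else []
termination_by (r + 1).toNat
decreasing_by omega

def process_diagonal_up_right_alt (numbers : List (List Int)) : Int :=
  let rows : Int := (numbers.length : Int)
  let cols : Int := ((numbers.headD []).length : Int)
  (PySem.List.pyRange 0 (rows + cols - 1) 1).foldl
    (fun best d =>
      let diag := buildDiag numbers d (min (rows - 1) d)
      (PySem.List.pyRange 0 ((diag.length : Int) - 3) 1).foldl
        (fun best i =>
          let p := PySem.List.pyGetD diag i 0 * PySem.List.pyGetD diag (i + 1) 0 *
                   PySem.List.pyGetD diag (i + 2) 0 * PySem.List.pyGetD diag (i + 3) 0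
          if p > best then p else best)
        best)
    0

-- ===== PRECONDITION & SPEC =====
-- Pre_ admits grids with fewer than 4 rows (no diagonal of 4 exists) and rectangular grids;
-- it excludes ragged grids of ≥ 4 rows, on which A can raise IndexError and, where A returns,
-- the set of 4-cell up-right windows A examines is an accident of indexing by each bottom row's length.
def Pre_process_diagonal_up_right (numbers : List (List Int)) : Prop :=
  numbers.length < 4 ∨ ∀ row ∈ numbers, row.length = (numbers.headD []).length
instance (numbers : List (List Int)) : Decidable (Pre_process_diagonal_up_right numbers) := by
  unfold Pre_process_diagonal_up_right; infer_instance

def pvWitness_process_diagonal_up_right : List (List Int) :=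
  [[1, 2, 3, 4], [5, 6, 7, 8], [9, 1, 2, 3], [4, 5, 6, 7]]

def Spec_process_diagonal_up_right (numbers : List (List Int)) (out : Int) : Prop := out = process_diagonal_up_right_alt numbers
instance (numbers : List (List Int)) (out : Int) : Decidable (Spec_process_diagonal_up_right numbers out) := by unfold Spec_process_diagonal_up_right; infer_instance

-- ===== CLAIM (what is proved, stated in full; the proofs are below) =====
def Claim_equal_process_diagonal_up_right : Prop := ∀ (numbers : List (List Int)), Dom_process_diagonal_up_right numbers → Pre_process_diagonal_up_right numbers → Spec_process_diagonal_up_right numbers (process_diagonal_up_right numbers)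

-- ===== LEMMAS AND PROOFS =====

lemma pv_ifmax (t res : Int) : (if t > res then t else res) = max res t := by
  rw [max_def]; split_ifs <;> omega

lemma pv_mm4 (a b c d : Int) : multiply_members [a, b, c, d] = a * b * c * d := by
  unfold multiply_members
  split_ifs with h
  · simp only [List.contains_cons, List.contains_nil, Bool.or_eq_true, beq_iff_eq,
      Bool.or_false] at h
    rcases h with h | h | h | h <;> subst h <;> ring
  · simp only [List.foldl_cons, List.foldl_nil]; ring

-- the cell numbers[r][c] as both ports read it
def pvCell (numbers : List (List Int)) (r c : Int) : Int :=
  PySem.List.pyGetD (PySem.List.pyGetD numbers r []) c 0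

-- A's window products, flattened in A's traversal order
def pvLA (numbers : List (List Int)) : List Int :=
  (PySem.List.pyRange ((numbers.length : Int) - 1) 2 (-1)).flatMap (fun row =>
    (PySem.List.pyRange 0 (((PySem.List.pyGetD numbers row []).length : Int) - 3) 1).map (fun col =>
      multiply_members [pvCell numbers row col, pvCell numbers (row - 1) (col + 1),
        pvCell numbers (row - 2) (col + 2), pvCell numbers (row - 3) (col + 3)]))

def pvDiag (numbers : List (List Int)) (d : Int) : List Int :=
  buildDiag numbers d (min ((numbers.length : Int) - 1) d)

-- B's window products, flattened in B's traversal order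
def pvLB (numbers : List (List Int)) : List Int :=
  (PySem.List.pyRange 0 ((numbers.length : Int) + ((numbers.headD []).length : Int) - 1) 1).flatMap
    (fun d =>
      (PySem.List.pyRange 0 (((pvDiag numbers d).length : Int) - 3) 1).map (fun i =>
        PySem.List.pyGetD (pvDiag numbers d) i 0 * PySem.List.pyGetD (pvDiag numbers d) (i + 1) 0 *
        PySem.List.pyGetD (pvDiag numbers d) (i + 2) 0 * PySem.List.pyGetD (pvDiag numbers d) (i + 3) 0))

lemma pvA_fold (numbers : List (List Int)) :
    process_diagonal_up_right numbers = (pvLA numbers).foldl max 0 := by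
  unfold process_diagonal_up_right pvLA
  rw [List.foldl_flatMap]
  apply PySem.List.foldl_congr_mem
  intro acc row _
  rw [List.foldl_map]
  apply PySem.List.foldl_congr_mem
  intro acc2 col _
  exact pv_ifmax _ _

lemma pvB_fold (numbers : List (List Int)) :
    process_diagonal_up_right_alt numbers = (pvLB numbers).foldl max 0 := by
  unfold process_diagonal_up_right_alt pvLB
  rw [List.foldl_flatMap]
  apply PySem.List.foldl_congr_mem
  intro acc d _
  rw [List.foldl_map]
  apply PySem.List.foldl_congr_mem
  intro acc2 i _
  exact pv_ifmax _ _

lemma pv_foldl_max_congr (l₁ l₂ : List Int) (a : Int) (h : ∀ x, x ∈ l₁ ↔ x ∈ l₂) :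
    l₁.foldl max a = l₂.foldl max a := by
  have key : ∀ u v : List Int, (∀ x ∈ u, x ∈ v) → u.foldl max a ≤ v.foldl max a := by
    intro u v huv
    rcases PySem.List.foldl_max_mem u a with h1 | h1
    · rw [h1]; exact (PySem.List.le_foldl_max v a).1
    · exact (PySem.List.le_foldl_max v a).2 _ (huv _ h1)
  exact le_antisymm (key _ _ fun x hx => (h x).1 hx) (key _ _ fun x hx => (h x).2 hx)

lemma pv_len_row (numbers : List (List Int)) {C : Int}
    (hC : ∀ row ∈ numbers, (row.length : Int) = C) {r : Int} (h0 : 0 ≤ r)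
    (h1 : r < (numbers.length : Int)) :
    ((PySem.List.pyGetD numbers r []).length : Int) = C := by
  rw [PySem.List.pyGetD_eq_getElem numbers [] h0 h1]
  exact hC _ (numbers.getElem_mem _)

theorem pv_buildDiag_eq (numbers : List (List Int)) {C : Int}
    (hC : ∀ row ∈ numbers, (row.length : Int) = C) (d r : Int)
    (hr : r < (numbers.length : Int)) :
    buildDiag numbers d r =
      (PySem.List.pyRange r (max (-1) (d - C)) (-1)).map (fun r' => pvCell numbers r' (d - r')) := by
  rw [buildDiag]
  split_ifs with h
  · have hlen := pv_len_row numbers hC h.1 hr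
    have hlt : max (-1) (d - C) < r := by omega
    rw [PySem.List.pyRange_neg_one_cons hlt, List.map_cons]
    congr 1
    exact pv_buildDiag_eq numbers hC d (r - 1) (by omega)
  · have hle : r ≤ max (-1) (d - C) := by
      by_cases h0 : 0 ≤ r
      · have hlen := pv_len_row numbers hC h0 hr
        rw [not_and] at h
        have := h h0
        omega
      · omega
    rw [PySem.List.pyRange_neg_one_eq_nil hle, List.map_nil]
termination_by (r + 1).toNat
decreasing_by omega

theorem pv_buildDiag_len_le (numbers : List (List Int)) (d r : Int) :
    (buildDiag numbers d r).length ≤ (r + 1).toNat := by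
  rw [buildDiag]
  split_ifs with h
  · have := pv_buildDiag_len_le numbers d (r - 1)
    simp only [List.length_cons]
    omega
  · simp
termination_by (r + 1).toNat
decreasing_by omega

lemma pv_diag_get (numbers : List (List Int)) {C : Int}
    (hC : ∀ row ∈ numbers, (row.length : Int) = C) (d : Int) {r : Int}
    (hr : r < (numbers.length : Int)) {j : Int} (hj0 : 0 ≤ j)
    (hjl : j < r - max (-1) (d - C)) :
    PySem.List.pyGetD (buildDiag numbers d r) j 0 = pvCell numbers (r - j) (d - (r - j)) := by
  rw [pv_buildDiag_eq numbers hC d r hr]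
  rw [PySem.List.pyGetD_eq_getElem _ _ hj0
    (by rw [List.length_map, PySem.List.length_pyRange_neg_one]; omega)]
  rw [List.getElem_map]
  have hidx : (PySem.List.pyRange r (max (-1) (d - C)) (-1))[j.toNat]'
      (by rw [PySem.List.length_pyRange_neg_one]; omega) = r - j := by
    simp only [PySem.List.pyRange_neg_one, List.getElem_map, List.getElem_range]
    omega
  rw [hidx]

lemma pvCell_congr (numbers : List (List Int)) {a b a' b' : Int} (ha : a = a') (hb : b = b') :
    pvCell numbers a b = pvCell numbers a' b' := by rw [ha, hb]

lemma pv_mem_iff (numbers : List (List Int))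
    (hC : ∀ row ∈ numbers, (row.length : Int) = ((numbers.headD []).length : Int)) (x : Int) :
    x ∈ pvLA numbers ↔ x ∈ pvLB numbers := by
  set R : Int := (numbers.length : Int) with hRdef
  set C : Int := ((numbers.headD []).length : Int) with hCdef
  have hR0 : 0 ≤ R := by rw [hRdef]; exact Int.natCast_nonneg _
  have hC0 : 0 ≤ C := by rw [hCdef]; exact Int.natCast_nonneg _
  constructor
  · intro hx
    simp only [pvLA, List.mem_flatMap, List.mem_map, PySem.List.mem_pyRange_neg_one,
      PySem.List.mem_pyRange_one] at hx
    obtain ⟨row, ⟨hrow2, hrowR⟩, col, ⟨hcol0, hcolC⟩, hxeq⟩ := hx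
    have hrowlt : row < R := by omega
    have hlenrow := pv_len_row numbers hC (by omega : (0:Int) ≤ row) hrowlt
    rw [hlenrow] at hcolC
    have hrle : min (R - 1) (row + col) < R := by omega
    have hlenD : (pvDiag numbers (row + col)).length
        = (min (R - 1) (row + col) - max (-1) (row + col - C)).toNat := by
      unfold pvDiag
      rw [pv_buildDiag_eq numbers hC (row + col) (min (R - 1) (row + col)) hrle]
      simp [PySem.List.length_pyRange_neg_one]
    simp only [pvLB, List.mem_flatMap, List.mem_map, PySem.List.mem_pyRange_one]
    refine ⟨row + col, ⟨by omega, by omega⟩,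
      min (R - 1) (row + col) - row, ⟨by omega, ?_⟩, ?_⟩
    · rw [hlenD]; omega
    · rw [← hxeq, pv_mm4]
      unfold pvDiag
      rw [pv_diag_get numbers hC (row + col) hrle (by omega) (by omega : min (R - 1) (row + col) - row < min (R - 1) (row + col) - max (-1) (row + col - C)),
          pv_diag_get numbers hC (row + col) hrle (by omega) (by omega : min (R - 1) (row + col) - row + 1 < min (R - 1) (row + col) - max (-1) (row + col - C)),
          pv_diag_get numbers hC (row + col) hrle (by omega) (by omega : min (R - 1) (row + col) - row + 2 < min (R - 1) (row + col) - max (-1) (row + col - C)),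
          pv_diag_get numbers hC (row + col) hrle (by omega) (by omega : min (R - 1) (row + col) - row + 3 < min (R - 1) (row + col) - max (-1) (row + col - C))]
      exact congr_arg₂ _ (congr_arg₂ _ (congr_arg₂ _
        (pvCell_congr _ (by omega) (by omega)) (pvCell_congr _ (by omega) (by omega)))
        (pvCell_congr _ (by omega) (by omega))) (pvCell_congr _ (by omega) (by omega))
  · intro hx
    simp only [pvLB, List.mem_flatMap, List.mem_map, PySem.List.mem_pyRange_one] at hx
    obtain ⟨d, ⟨hd0, hdR⟩, i, ⟨hi0, hiD⟩, hxeq⟩ := hx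
    have hrle : min (R - 1) d < R := by omega
    have hlenD : (pvDiag numbers d).length
        = (min (R - 1) d - max (-1) (d - C)).toNat := by
      unfold pvDiag
      rw [pv_buildDiag_eq numbers hC d (min (R - 1) d) hrle]
      simp [PySem.List.length_pyRange_neg_one]
    rw [hlenD] at hiD
    simp only [pvLA, List.mem_flatMap, List.mem_map, PySem.List.mem_pyRange_neg_one,
      PySem.List.mem_pyRange_one] at hiD ⊢
    refine ⟨min (R - 1) d - i, ⟨by omega, by omega⟩,
      d - (min (R - 1) d - i), ⟨by omega, ?_⟩, ?_⟩
    · rw [pv_len_row numbers hC (by omega) (by omega : min (R - 1) d - i < R)]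
      omega
    · rw [← hxeq, pv_mm4]
      unfold pvDiag
      rw [pv_diag_get numbers hC d hrle (by omega) (by omega : i < min (R - 1) d - max (-1) (d - C)),
          pv_diag_get numbers hC d hrle (by omega) (by omega : i + 1 < min (R - 1) d - max (-1) (d - C)),
          pv_diag_get numbers hC d hrle (by omega) (by omega : i + 2 < min (R - 1) d - max (-1) (d - C)),
          pv_diag_get numbers hC d hrle (by omega) (by omega : i + 3 < min (R - 1) d - max (-1) (d - C))]
      exact congr_arg₂ _ (congr_arg₂ _ (congr_arg₂ _
        (pvCell_congr _ (by omega) (by omega)) (pvCell_congr _ (by omega) (by omega)))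
        (pvCell_congr _ (by omega) (by omega))) (pvCell_congr _ (by omega) (by omega))

-- ===== VERDICT (by name: the statement is the Claim_ definition above) =====
theorem process_diagonal_up_right_spec : Claim_equal_process_diagonal_up_right := by
  intro numbers _ hpre
  unfold Spec_process_diagonal_up_right
  rw [pvA_fold, pvB_fold]
  rcases hpre with hsmall | hrect
  · have hLA : pvLA numbers = [] := by
      unfold pvLA
      rw [PySem.List.pyRange_neg_one_eq_nil (by omega : ((numbers.length : Int) - 1) ≤ 2)]
      rfl
    have hLB : pvLB numbers = [] := by
      unfold pvLB
      apply List.flatMap_eq_nil_iff.mpr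
      intro d _
      have hlen := pv_buildDiag_len_le numbers d (min ((numbers.length : Int) - 1) d)
      have : ((pvDiag numbers d).length : Int) - 3 ≤ 0 := by
        unfold pvDiag
        omega
      rw [PySem.List.pyRange_one_eq_nil (by omega)]
      rfl
    rw [hLA, hLB]
  · exact pv_foldl_max_congr _ _ 0
      (pv_mem_iff numbers (fun row h => by exact_mod_cast hrect row h))
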